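-- pv_equiv track=rewrite | github.com/cantsaydorifto/leet-py | 421/totalCharactersInStringAfterTransform1.py | lengthAfterTransformationsBrute
-- ===== SOURCE A (Python) =====
-- def lengthAfterTransformationsBrute(s: str, t: int) -> int:
--     for _ in range(t):
--         res = ""
--         for i in s:
--             if i == "z":
--                 res += "ab"
--                 continue
--             res += chr(ord(i) + 1)
--         s = res
--     return len(res) % (10**9 + 7)
-- ===== SOURCE B (Python) =====
-- def lengthAfterTransformationsBrute(s: str, t: int) -> int:
--     # DP on per-code-point length contributions: f[c] = length after the
--     # remaining steps of a single character with code c (codes >= 123 never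
--     # change length).  O(123*t + len(s)) instead of building the string.
--     f = [1] * 123
--     for _ in range(t):
--         nf = f[1:] + [1]
--         nf[122] = f[97] + f[98]
--         f = nf
--     return sum(f[ord(c)] if ord(c) < 123 else 1 for c in s) % (10**9 + 7)
-- ===== Notes on version B (the rewrite author's own statement) =====
-- stated objective: faster
-- what changed: Instead of rebuilding the (exponentially growing) string t times, B keeps a 123-entry DP vector of per-code-point length contributions, updates it t times, and sums the entries at the codes of s, taking the result mod 10^9+7.
import Mathlib
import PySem

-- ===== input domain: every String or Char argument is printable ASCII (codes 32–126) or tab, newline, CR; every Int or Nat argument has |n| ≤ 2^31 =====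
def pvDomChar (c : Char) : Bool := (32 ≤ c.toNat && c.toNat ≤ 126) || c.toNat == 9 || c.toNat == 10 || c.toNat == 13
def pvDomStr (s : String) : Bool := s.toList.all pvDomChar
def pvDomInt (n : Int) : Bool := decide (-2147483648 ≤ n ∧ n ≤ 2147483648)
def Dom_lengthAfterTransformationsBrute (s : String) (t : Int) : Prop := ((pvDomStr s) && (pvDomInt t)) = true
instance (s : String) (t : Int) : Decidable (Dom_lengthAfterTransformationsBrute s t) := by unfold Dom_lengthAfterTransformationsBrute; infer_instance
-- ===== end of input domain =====

-- B replaces A's exponential string rebuilding by a 123-entry DP of per-code-point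
-- length contributions (objective: faster).

-- ===== PORT A =====
-- The evolving Python str is modelled by its list of code points (List Nat): this is
-- exact for every Python str ('z' is code 122, chr(ord(i)+1) is code i+1, "ab" is
-- [97,98], len is the list length); Lean's Char cannot carry the surrogate code
-- points the evolving string can reach, so the port works on codes directly.
def pvTrA (s : List Nat) : List Nat :=
  s.foldl (fun res i => if i = 122 then res ++ [97, 98] else res ++ [i + 1]) []

def lengthAfterTransformationsBrute (s : String) (t : Int) : Int :=
  let st := (PySem.List.pyRange 0 t 1).foldl
      (fun (st : List Nat × Option (List Nat)) _ =>
        let r := pvTrA st.1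
        (r, some r))
      (s.toList.map Char.toNat, none)
  match st.2 with
  | some r => PySem.Int.mod (Int.ofNat r.length) (10 ^ 9 + 7)
  | none => 0   -- Python raises NameError here (t ≤ 0: res is unbound); excluded by Pre_

-- ===== PORT B =====
def pvStepF (f : List Int) : List Int :=
  PySem.List.pySetD (PySem.List.slice f (some 1) none ++ [1]) 122
    (PySem.List.pyGetD f 97 0 + PySem.List.pyGetD f 98 0)

def lengthAfterTransformationsBrute_alt (s : String) (t : Int) : Int :=
  let f := (PySem.List.pyRange 0 t 1).foldl (fun f _ => pvStepF f)
      (List.replicate 123 (1 : Int))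
  PySem.Int.mod
    (s.toList.foldl
      (fun acc c => acc + (if c.toNat < 123 then PySem.List.pyGetD f (c.toNat : Int) 0 else 1)) 0)
    (10 ^ 9 + 7)

-- ===== PRECONDITION & SPEC =====
-- Pre_ is exactly where the Python A returns: t ≥ 1 (for t ≤ 0 'res' is unbound and A
-- raises NameError), and no character above 'z' may climb past chr's maximum code
-- point 0x10FFFF = 1114111 within t steps (otherwise A raises ValueError).
def Pre_lengthAfterTransformationsBrute (s : String) (t : Int) : Prop :=
  1 ≤ t ∧ s.toList.all
    (fun c => decide (c.toNat < 123) || decide (t ≤ 1114111 - (c.toNat : Int))) = true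
instance (s : String) (t : Int) : Decidable (Pre_lengthAfterTransformationsBrute s t) := by
  unfold Pre_lengthAfterTransformationsBrute; infer_instance

def pvWitness_lengthAfterTransformationsBrute : String × Int := ("abz~", 3)

def Spec_lengthAfterTransformationsBrute (s : String) (t : Int) (out : Int) : Prop :=
  out = lengthAfterTransformationsBrute_alt s t
instance (s : String) (t : Int) (out : Int) : Decidable (Spec_lengthAfterTransformationsBrute s t out) := by
  unfold Spec_lengthAfterTransformationsBrute; infer_instance

-- ===== CLAIM (what is proved, stated in full; the proofs are below) =====
def Claim_equal_lengthAfterTransformationsBrute : Prop := ∀ (s : String) (t : Int), Dom_lengthAfterTransformationsBrute s t → Pre_lengthAfterTransformationsBrute s t → Spec_lengthAfterTransformationsBrute s t (lengthAfterTransformationsBrute s t)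

-- ===== LEMMAS AND PROOFS =====

-- the one-step image of a single code point
def pvStep (c : Nat) : List Nat := if c = 122 then [97, 98] else [c + 1]

-- A's iteration, the per-code-point length pvL, and B's DP vector pvF
def pvIterA : Nat → List Nat → List Nat
  | 0, s => s
  | k + 1, s => pvIterA k (pvTrA s)

def pvL (k c : Nat) : Nat := (pvIterA k [c]).length

def pvF (k : Nat) : List Int := pvStepF^[k] (List.replicate 123 (1 : Int))

theorem pvTrA_eq (s : List Nat) : pvTrA s = s.flatMap pvStep := by
  have h : (fun (res : List Nat) i => if i = 122 then res ++ [97, 98] else res ++ [i + 1])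
      = fun res i => res ++ pvStep i := by
    funext res i; by_cases h : i = 122 <;> simp [pvStep, h]
  rw [pvTrA, h, PySem.List.foldl_append_eq_flatMap, List.nil_append]

theorem pvIterA_flatMap (k : Nat) (s : List Nat) :
    pvIterA (k + 1) s = pvIterA k (s.flatMap pvStep) := by
  simp [pvIterA, pvTrA_eq]

theorem pvLen_iter (k : Nat) : ∀ s : List Nat, (pvIterA k s).length = (s.map (pvL k)).sum := by
  induction k with
  | zero =>
    intro s
    have h1 : pvL 0 = fun _ => 1 := by funext c; simp [pvL, pvIterA]
    simp [pvIterA, h1, List.map_const', List.sum_replicate]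
  | succ k ih =>
    intro s
    rw [pvIterA_flatMap, ih]
    induction s with
    | nil => simp
    | cons c cs ihs =>
      simp only [List.flatMap_cons, List.map_append, List.sum_append, ihs, List.map_cons,
        List.sum_cons]
      congr 1
      rw [pvL, pvIterA_flatMap, ih, List.flatMap_singleton]

theorem pvL_succ (k c : Nat) : pvL (k + 1) c = ((pvStep c).map (pvL k)).sum := by
  simp only [pvL, pvIterA_flatMap, pvLen_iter, List.flatMap_singleton]

theorem pvL_high (k : Nat) : ∀ c, 122 < c → pvL k c = 1 := by
  induction k with
  | zero => intro c _; simp [pvL, pvIterA]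
  | succ k ih =>
    intro c hc
    rw [pvL_succ, pvStep, if_neg (by omega)]
    simp [ih (c + 1) (by omega)]

theorem pvStepF_eq (f : List Int) :
    pvStepF f = (f.tail ++ [1]).set 122 (f.getD 97 0 + f.getD 98 0) := by
  rw [pvStepF, PySem.List.slice_from_one, PySem.List.pyGetD_ofNat',
    PySem.List.pyGetD_ofNat', PySem.List.pySetD_of_nonneg _ _ (by norm_num)]
  rfl

theorem pvF_succ (k : Nat) : pvF (k + 1) = pvStepF (pvF k) :=
  Function.iterate_succ_apply' pvStepF k _

theorem pvF_length (k : Nat) : (pvF k).length = 123 := by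
  induction k with
  | zero => simp [pvF]
  | succ k ih => simp [pvF_succ, pvStepF_eq, List.length_tail, ih]

theorem pvF_correct (k : Nat) : ∀ c, c < 123 → (pvF k).getD c 0 = (pvL k c : Int) := by
  induction k with
  | zero =>
    intro c hc
    have h1 : pvL 0 c = 1 := by simp [pvL, pvIterA]
    rw [pvF, Function.iterate_zero, id_eq, List.getD_eq_getElem?_getD,
      List.getElem?_replicate, if_pos hc, h1]
    rfl
  | succ k ih =>
    intro c hc
    have hlen : (pvF k).length = 123 := pvF_length k
    have hlen2 : ((pvF k).tail ++ [1]).length = 123 := by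
      simp [List.length_tail, hlen]
    rw [pvF_succ, pvStepF_eq, List.getD_eq_getElem?_getD, List.getElem?_set]
    by_cases h122 : c = 122
    · subst h122
      rw [if_pos rfl, if_pos (by omega)]
      rw [ih 97 (by omega), ih 98 (by omega)]
      rw [pvL_succ, pvStep, if_pos rfl]
      simp
    · rw [if_neg (by omega), List.getElem?_append,
        if_pos (by simp [List.length_tail, hlen]; omega), List.getElem?_tail]
      have h1 : (pvF k)[c + 1]?.getD 0 = (pvF k).getD (c + 1) 0 :=
        (List.getD_eq_getElem?_getD).symm
      rw [h1, ih (c + 1) (by omega), pvL_succ, pvStep, if_neg h122]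
      simp

-- the outer 'for _ in range(t)' of both programs only iterates a state update
theorem pvFoldlConst {α β : Type} (g : α → α) :
    ∀ (l : List β) (init : α), l.foldl (fun st _ => g st) init = g^[l.length] init := by
  intro l
  induction l with
  | nil => intro init; simp
  | cons x xs ih => intro init; simp [ih, Function.iterate_succ_apply]

theorem pvStateA (n : Nat) : ∀ (s0 : List Nat) (r0 : Option (List Nat)),
    (fun (st : List Nat × Option (List Nat)) => (pvTrA st.1, some (pvTrA st.1)))^[n + 1] (s0, r0)
      = (pvIterA (n + 1) s0, some (pvIterA (n + 1) s0)) := by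
  induction n with
  | zero => intro s0 r0; simp [pvIterA]
  | succ n ih =>
    intro s0 r0
    rw [Function.iterate_succ_apply, ih (pvTrA s0) (some (pvTrA s0))]
    rfl

theorem pvSumFold (l : List Char) (h : Char → Int) :
    ∀ init : Int, l.foldl (fun acc c => acc + h c) init = init + (l.map h).sum := by
  induction l with
  | nil => intro init; simp
  | cons c cs ih => intro init; simp [ih]; ring

theorem lengthAfterTransformationsBrute_spec : Claim_equal_lengthAfterTransformationsBrute := by
  intro s t _ hPre
  unfold Spec_lengthAfterTransformationsBrute
  obtain ⟨ht, -⟩ := hPre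
  obtain ⟨m, hm⟩ : ∃ m, t.toNat = m + 1 := ⟨t.toNat - 1, by omega⟩
  have hlen : (PySem.List.pyRange 0 t 1).length = m + 1 := by
    rw [PySem.List.length_pyRange_one]; omega
  unfold lengthAfterTransformationsBrute lengthAfterTransformationsBrute_alt
  rw [pvFoldlConst (fun (st : List Nat × Option (List Nat)) => (pvTrA st.1, some (pvTrA st.1))),
    pvFoldlConst pvStepF, hlen, pvStateA]
  have hF : pvStepF^[m + 1] (List.replicate 123 (1 : Int)) = pvF (m + 1) := rfl
  rw [hF]
  simp only []
  rw [pvSumFold, pvLen_iter]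
  congr 1
  rw [zero_add, List.map_map, Int.ofNat_eq_natCast, Nat.cast_list_sum, List.map_map]
  refine congrArg List.sum (List.map_congr_left ?_)
  intro c _
  simp only [Function.comp_apply, PySem.List.pyGetD_natCast]
  by_cases hc : c.toNat < 123
  · rw [if_pos hc, pvF_correct (m + 1) c.toNat hc]
  · rw [if_neg hc, pvL_high (m + 1) c.toNat (by omega), Nat.cast_one]
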